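-- pv_equiv track=rewrite | github.com/KKBS22/Cryptography_StreamCiphers | Python_IMP/CryptanalysisLib.py | poly_coeff
-- ===== SOURCE A (Python) =====
-- def poly_coeff(polynomial):
--     result = []
--     lis = sorted(polynomial, reverse=True)
--     for i in lis:
--         if i == 0:
--             result.append(1)
--         else:
--             result.append(i)
--
--         if i != lis[-1]:
--             pass
--         return result
-- ===== SOURCE B (Python) =====
-- def poly_coeff(polynomial):
--     if not polynomial:
--         return None
--     m = max(polynomial)
--     return [1] if m == 0 else [m]
-- ===== Notes on version B (the rewrite author's own statement) =====
-- stated objective: simpler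
-- what changed: A sorts the whole list descending and runs a loop whose unconditional mid-loop return fires on the first iteration; B computes the maximum in one linear scan and returns it as a singleton (replaced by 1 when the maximum is zero), with no sort, accumulator list or loop; the empty list, where both Pythons return None instead of a list, is excluded by Pre_.
-- outside the precondition, e.g. on poly_coeff([]): A returns None, B returns None
import Mathlib
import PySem

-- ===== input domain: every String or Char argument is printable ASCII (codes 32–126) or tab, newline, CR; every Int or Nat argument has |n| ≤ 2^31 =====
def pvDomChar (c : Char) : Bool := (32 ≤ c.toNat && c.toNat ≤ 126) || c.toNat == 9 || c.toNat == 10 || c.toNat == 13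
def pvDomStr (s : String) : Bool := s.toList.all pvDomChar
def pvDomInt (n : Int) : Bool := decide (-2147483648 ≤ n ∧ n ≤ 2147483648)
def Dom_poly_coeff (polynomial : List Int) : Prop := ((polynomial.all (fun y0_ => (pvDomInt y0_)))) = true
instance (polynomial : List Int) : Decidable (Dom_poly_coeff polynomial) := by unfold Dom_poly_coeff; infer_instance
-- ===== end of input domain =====

-- B replaces A's sort + first-iteration-return loop by a single linear max scan (simpler); both Pythons return None on [], excluded by Pre_.

-- ===== PORT A =====
def poly_coeff (polynomial : List Int) : List Int :=
  let result : List Int := []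
  let lis := PySem.List.sorted polynomial (fun x => x) true
  match lis with
  | [] => []            -- loop body never runs: Python returns None here (outside Pre_)
  | i :: _ =>           -- first loop iteration ends in an unconditional 'return result'
    let result := if i = 0 then result ++ [1] else result ++ [i]
    result

-- ===== PORT B =====
def poly_coeff_alt (polynomial : List Int) : List Int :=
  match polynomial with
  | [] => []            -- Python B returns None here (outside Pre_)
  | _ :: _ =>
    match PySem.List.max? polynomial (fun x => x) with
    | some m => if m = 0 then [1] else [m]
    | none => []        -- unreachable: list nonempty

-- ===== PRECONDITION & SPEC =====
-- Pre_ excludes only the empty list, on which both Pythons return None, which is not a value of List Int.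
def Pre_poly_coeff (polynomial : List Int) : Prop := polynomial ≠ []
instance (polynomial : List Int) : Decidable (Pre_poly_coeff polynomial) := by unfold Pre_poly_coeff; infer_instance
def pvWitness_poly_coeff : List Int := [0, 3, -2]

def Spec_poly_coeff (polynomial : List Int) (out : List Int) : Prop := out = poly_coeff_alt polynomial
instance (polynomial : List Int) (out : List Int) : Decidable (Spec_poly_coeff polynomial out) := by unfold Spec_poly_coeff; infer_instance

-- ===== CLAIM (what is proved, stated in full; the proofs are below) =====
def Claim_equal_poly_coeff : Prop := ∀ (polynomial : List Int), Dom_poly_coeff polynomial → Pre_poly_coeff polynomial → Spec_poly_coeff polynomial (poly_coeff polynomial)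

-- ===== LEMMAS AND PROOFS =====
-- head of the descending sort of a nonempty list equals its maximum
lemma head_sorted_rev_eq_max (xs : List Int) (h t m)
    (hs : PySem.List.sorted xs (fun x => x) true = h :: t)
    (hm : PySem.List.max? xs (fun x => x) = some m) : h = m := by
  have hmem : h ∈ xs := by
    have := PySem.List.sorted_perm xs (fun x => x) true
    rw [hs] at this
    exact this.mem_iff.mp (List.mem_cons_self ..)
  have h1 : h ≤ m := PySem.List.max?_isMax hm h hmem
  have h2 : m ≤ h := PySem.List.key_head_sorted_rev_ge xs (fun x => x) hs m (PySem.List.max?_mem hm)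
  omega

-- ===== VERDICT (by name: the statement is the Claim_ definition above) =====
theorem poly_coeff_spec : Claim_equal_poly_coeff := by
  intro xs _ hpre
  unfold Spec_poly_coeff poly_coeff poly_coeff_alt
  obtain ⟨x, t, rfl⟩ := List.exists_cons_of_ne_nil hpre
  rcases hs : PySem.List.sorted (x :: t) (fun x => x) true with _ | ⟨h, rest⟩
  · exact absurd ((PySem.List.sorted_eq_nil_iff ..).mp hs) (by simp)
  rcases hm : PySem.List.max? (x :: t) (fun x => x) with _ | m
  · exact absurd ((PySem.List.max?_eq_none_iff ..).mp hm) (by simp)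
  have := head_sorted_rev_eq_max (x :: t) h rest m hs hm
  subst this
  simp
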